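-- pv_equiv track=rewrite | github.com/christiechindy/BE_generateBoBI | Pages_to_pagesr.py | convert
-- ===== SOURCE A (Python) =====
-- def convert(pages):
--     pages_r = []
--     now = {}
--
--     for i in range(len(pages)):
--         if i == 0:
--             now["f"] = pages[i]["f"] + pages[i]["d"]
--             now["d"] = pages[i]["d"]
--             now["l"] = pages[i]["l"] + pages[i]["d"]
--             continue
--
--         if pages[i]["d"] != pages[i-1]["d"]:
--             now["l"] = pages[i]["f"] + pages[i]["d"] - 1
--             pages_r.append(now)
--             now = {}
--             now["f"] = pages[i]["f"] + pages[i]["d"]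
--             now["d"] = pages[i]["d"]
--             now["l"] = pages[i]["l"] + pages[i]["d"]
--         else:
--             now["l"] = pages[i]["l"] + pages[i]["d"]
--
--     pages_r.append(now)
--
--     return pages_r
-- ===== SOURCE B (Python) =====
-- def convert(pages):
--     if not pages:
--         return []
--     # Pass 1: split pages into maximal runs of equal "d", kept as (first, last) pairs.
--     runs = []
--     start = 0
--     for i in range(1, len(pages)):
--         if pages[i]["d"] != pages[i - 1]["d"]:
--             runs.append((pages[start], pages[i - 1]))
--             start = i
--     runs.append((pages[start], pages[-1]))
--     # Pass 2: one output range per run; a non-final run ends just before the next run's shifted start.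
--     result = []
--     for j in range(len(runs)):
--         first, last = runs[j]
--         d = first["d"]
--         if j + 1 < len(runs):
--             nxt = runs[j + 1][0]
--             l = nxt["f"] + nxt["d"] - 1
--         else:
--             l = last["l"] + d
--         result.append({"f": first["f"] + d, "d": d, "l": l})
--     return result
-- ===== Notes on version B (the rewrite author's own statement) =====
-- stated objective: alternative
-- what changed: Replaces A's single mutable-dict scan with a two-pass decomposition: first partition pages into maximal runs of equal 'd' as (first,last) pairs, then map each run (with its successor) to an output range; B also returns an empty list on empty input where A returns a singleton holding an empty dict.
-- intended difference: On the empty input A returns a singleton list holding one empty dict, an artefact of its unconditional trailing append of the loop state; B returns an empty list, the intended 'no ranges' value. — e.g. on convert([]): A returns [[]], B returns []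
import Mathlib
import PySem

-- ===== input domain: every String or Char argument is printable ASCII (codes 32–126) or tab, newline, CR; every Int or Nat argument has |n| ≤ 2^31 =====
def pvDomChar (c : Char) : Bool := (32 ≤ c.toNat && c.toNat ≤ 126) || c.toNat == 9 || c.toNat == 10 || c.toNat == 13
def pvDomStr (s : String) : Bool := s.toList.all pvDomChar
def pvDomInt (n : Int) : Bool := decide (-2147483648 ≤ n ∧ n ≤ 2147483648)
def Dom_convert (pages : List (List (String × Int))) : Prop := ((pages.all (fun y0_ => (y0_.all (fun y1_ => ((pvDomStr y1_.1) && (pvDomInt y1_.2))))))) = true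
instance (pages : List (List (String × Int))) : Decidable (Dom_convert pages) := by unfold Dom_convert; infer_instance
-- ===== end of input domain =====

-- B re-decomposes A's single mutable-dict scan into run-partitioning followed by a map over runs;
-- on the empty input A returns a singleton empty dict and B an empty list (the intended difference D_ below).

-- ===== PORT A =====
-- pages[i][k]: first-match dict lookup; the default 0 is only reachable outside Pre_convert (Python raises KeyError there)
def dget (p : List (String × Int)) (k : String) : Int := (PySem.Dict.mk p).getD k 0

-- one iteration of A's 'for i in range(len(pages))' loop; state = (pages_r, now)
def aStep (pages : List (List (String × Int)))
    (st : List (List (String × Int)) × PySem.Dict String Int) (i : Nat) :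
    List (List (String × Int)) × PySem.Dict String Int :=
  let pi := pages.getD i []
  if i = 0 then
    (st.1, ((st.2.insert "f" (dget pi "f" + dget pi "d")).insert "d" (dget pi "d")).insert "l"
      (dget pi "l" + dget pi "d"))
  else
    let pim := pages.getD (i - 1) []
    if dget pi "d" ≠ dget pim "d" then
      let now1 := st.2.insert "l" (dget pi "f" + dget pi "d" - 1)
      let now2 := ((PySem.Dict.empty.insert "f" (dget pi "f" + dget pi "d")).insert "d"
        (dget pi "d")).insert "l" (dget pi "l" + dget pi "d")
      (st.1 ++ [now1.items], now2)
    else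
      (st.1, st.2.insert "l" (dget pi "l" + dget pi "d"))

def convert (pages : List (List (String × Int))) : List (List (String × Int)) :=
  let st := (List.range pages.length).foldl (aStep pages) ([], PySem.Dict.empty)
  st.1 ++ [st.2.items]

-- ===== PORT B =====
-- one iteration of B's run-collecting loop; state = (runs, start)
def bStep (pages : List (List (String × Int)))
    (st : List ((List (String × Int)) × (List (String × Int))) × Nat) (i : Nat) :
    List ((List (String × Int)) × (List (String × Int))) × Nat :=
  if dget (pages.getD i []) "d" ≠ dget (pages.getD (i - 1) []) "d" then
    (st.1 ++ [(pages.getD st.2 [], pages.getD (i - 1) [])], i)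
  else st

-- body of B's second loop: output range for run j
def bBuild (runs : List ((List (String × Int)) × (List (String × Int)))) (j : Nat) :
    List (String × Int) :=
  let r := runs.getD j ([], [])
  let d := dget r.1 "d"
  let l :=
    if j + 1 < runs.length then
      let nxt := (runs.getD (j + 1) ([], [])).1
      dget nxt "f" + dget nxt "d" - 1
    else dget r.2 "l" + d
  [("f", dget r.1 "f" + d), ("d", d), ("l", l)]

def convert_alt (pages : List (List (String × Int))) : List (List (String × Int)) :=
  if pages = [] then []
  else
    let st := (List.range' 1 (pages.length - 1) 1).foldl (bStep pages) ([], 0)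
    let runs := st.1 ++ [(pages.getD st.2 [], pages.getD (pages.length - 1) [])]
    (List.range runs.length).map (bBuild runs)

-- ===== PRECONDITION & SPEC =====
-- Pre_ excludes exactly the pages on which A raises KeyError: an element missing key "d" or
-- "l", or a run-starting element (the first page, or one whose "d" differs from its
-- predecessor's first-match "d") missing key "f".
def Pre_convert (pages : List (List (String × Int))) : Prop :=
  (∀ p ∈ pages, "d" ∈ p.map Prod.fst ∧ "l" ∈ p.map Prod.fst) ∧
  (∀ p ∈ pages.take 1, "f" ∈ p.map Prod.fst) ∧
  (∀ pr ∈ pages.zip pages.tail, dget pr.2 "d" ≠ dget pr.1 "d" → "f" ∈ pr.2.map Prod.fst)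
instance (pages : List (List (String × Int))) : Decidable (Pre_convert pages) := by
  unfold Pre_convert; infer_instance

def pvWitness_convert : (List (List (String × Int))) := [[("f", 1), ("d", 2), ("l", 3)]]

-- On the empty input A returns a singleton list holding one empty dict, an artefact of its
-- unconditional trailing append of the loop state; B returns an empty list, the intended
-- 'no ranges' value.
def D_convert (pages : List (List (String × Int))) : Prop := pages = []
instance (pages : List (List (String × Int))) : Decidable (D_convert pages) := by
  unfold D_convert; infer_instance

def Spec_convert (pages : List (List (String × Int))) (out : List (List (String × Int))) : Prop :=
  ¬ D_convert pages → out = convert_alt pages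
instance (pages : List (List (String × Int))) (out : List (List (String × Int))) :
    Decidable (Spec_convert pages out) := by unfold Spec_convert; infer_instance

def pvDiffWitness_convert : (List (List (String × Int))) := []
def pvDiffWitnessOut_convert : (List (List (String × Int))) × (List (List (String × Int))) :=
  ([[]], [])

-- ===== CLAIM (what is proved, stated in full; the proofs are below) =====
def Claim_unchanged_convert : Prop := ∀ (pages : List (List (String × Int))),
  Dom_convert pages → Pre_convert pages → Spec_convert pages (convert pages)
def Claim_changed_convert : Prop := Dom_convert (pvDiffWitness_convert) ∧
  Pre_convert (pvDiffWitness_convert) ∧ D_convert (pvDiffWitness_convert) ∧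
  convert (pvDiffWitness_convert) = pvDiffWitnessOut_convert.1 ∧
  convert_alt (pvDiffWitness_convert) = pvDiffWitnessOut_convert.2 ∧
  pvDiffWitnessOut_convert.1 ≠ pvDiffWitnessOut_convert.2
def Claim_exact_convert : Prop := ∀ (pages : List (List (String × Int))),
  Dom_convert pages → Pre_convert pages → D_convert pages → convert pages ≠ convert_alt pages

-- ===== LEMMAS AND PROOFS =====

-- common midpoint: the merged ranges for a run whose first element is pf, last-seen element pl,
-- and remaining pages cur
def goSpec (pf pl : List (String × Int)) (cur : List (List (String × Int))) :
    List (List (String × Int)) :=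
  match cur with
  | [] => [[("f", dget pf "f" + dget pf "d"), ("d", dget pf "d"), ("l", dget pl "l" + dget pl "d")]]
  | p :: rs =>
    if dget p "d" ≠ dget pl "d" then
      [("f", dget pf "f" + dget pf "d"), ("d", dget pf "d"), ("l", dget p "f" + dget p "d" - 1)]
        :: goSpec p p rs
    else goSpec pf p rs

-- the run list B's first pass computes, recursively
def runsSpec (pf pl : List (String × Int)) (cur : List (List (String × Int))) :
    List ((List (String × Int)) × (List (String × Int))) :=
  match cur with
  | [] => [(pf, pl)]
  | p :: rs =>
    if dget p "d" ≠ dget pl "d" then (pf, pl) :: runsSpec p p rs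
    else runsSpec pf p rs

-- the output B's second pass computes from a run list, recursively
def outSpec (runs : List ((List (String × Int)) × (List (String × Int)))) :
    List (List (String × Int)) :=
  match runs with
  | [] => []
  | [(pf, pl)] =>
    [[("f", dget pf "f" + dget pf "d"), ("d", dget pf "d"), ("l", dget pl "l" + dget pf "d")]]
  | (pf, _) :: (q :: t) =>
    [("f", dget pf "f" + dget pf "d"), ("d", dget pf "d"),
      ("l", dget q.1 "f" + dget q.1 "d" - 1)] :: outSpec (q :: t)

-- A's "now" dict for a run with first element pf, last-seen element pl
def mkNow (pf pl : List (String × Int)) : PySem.Dict String Int :=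
  ((PySem.Dict.empty.insert "f" (dget pf "f" + dget pf "d")).insert "d" (dget pf "d")).insert "l"
    (dget pl "l" + dget pl "d")

def finishA (st : List (List (String × Int)) × PySem.Dict String Int) :
    List (List (String × Int)) := st.1 ++ [st.2.items]

def finishB (pages : List (List (String × Int)))
    (st : List ((List (String × Int)) × (List (String × Int))) × Nat) :
    List ((List (String × Int)) × (List (String × Int))) :=
  st.1 ++ [(pages.getD st.2 [], pages.getD (pages.length - 1) [])]

theorem mkNow_items (pf pl : List (String × Int)) :
    (mkNow pf pl).items =
      [("f", dget pf "f" + dget pf "d"), ("d", dget pf "d"), ("l", dget pl "l" + dget pl "d")] := by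
  rfl

theorem mkNow_insert_l (pf pl p : List (String × Int)) :
    (mkNow pf pl).insert "l" (dget p "l" + dget p "d") = mkNow pf p := by
  rfl

theorem getD_append_length {α : Type} (done : List α) (cur : List α) (x : α) (d : α) :
    (done ++ x :: cur).getD done.length d = x := by
  simp [List.getD]

theorem getD_append_last {α : Type} (done : List α) (cur : List α) (d : α) (h : done ≠ []) :
    (done ++ cur).getD (done.length - 1) d = done.getLast h := by
  have h1 : done.length - 1 < done.length := by
    have := List.length_pos_of_ne_nil h; omega
  simp [List.getD, List.getElem?_append_left h1, List.getElem?_eq_getElem h1,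
    List.getLast_eq_getElem]

theorem aLoop (pages : List (List (String × Int))) (cur : List (List (String × Int))) :
    ∀ (done : List (List (String × Int))) (pf : List (String × Int))
      (pr : List (List (String × Int))) (h : done ≠ []), pages = done ++ cur →
    finishA ((List.range' done.length cur.length 1).foldl (aStep pages)
        (pr, mkNow pf (done.getLast h))) = pr ++ goSpec pf (done.getLast h) cur := by
  induction cur with
  | nil => intro done pf pr h hp; simp [finishA, goSpec, mkNow_items]
  | cons p rs ih =>
    intro done pf pr h hp
    have hlen : done.length ≠ 0 := by
      simpa [List.length_eq_zero_iff] using h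
    have hget : pages.getD done.length [] = p := by
      rw [hp]; exact getD_append_length done rs p []
    have hgetm : pages.getD (done.length - 1) [] = done.getLast h := by
      rw [hp]; exact getD_append_last done (p :: rs) [] h
    have hne : done ++ [p] ≠ [] := by simp
    have hlast : (done ++ [p]).getLast hne = p := by simp
    have hplen : (done ++ [p]).length = done.length + 1 := by simp
    have hp' : pages = (done ++ [p]) ++ rs := by simp [hp]
    rw [show (p :: rs).length = rs.length + 1 from rfl, List.range'_succ, List.foldl_cons]
    simp only [aStep, hget, hgetm, if_neg hlen]
    by_cases hd : dget p "d" ≠ dget (done.getLast h) "d"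
    · rw [if_pos hd, goSpec, if_pos hd]
      have ihx := ih (done ++ [p]) p
        (pr ++ [[("f", dget pf "f" + dget pf "d"), ("d", dget pf "d"),
          ("l", dget p "f" + dget p "d" - 1)]]) hne hp'
      rw [hlast, hplen] at ihx
      calc finishA ((List.range' (done.length + 1) rs.length 1).foldl (aStep pages)
            (pr ++ [((mkNow pf (done.getLast h)).insert "l"
              (dget p "f" + dget p "d" - 1)).items],
             ((PySem.Dict.empty.insert "f" (dget p "f" + dget p "d")).insert "d"
              (dget p "d")).insert "l" (dget p "l" + dget p "d")))
          = finishA ((List.range' (done.length + 1) rs.length 1).foldl (aStep pages)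
            (pr ++ [[("f", dget pf "f" + dget pf "d"), ("d", dget pf "d"),
              ("l", dget p "f" + dget p "d" - 1)]], mkNow p p)) := by rfl
        _ = (pr ++ [[("f", dget pf "f" + dget pf "d"), ("d", dget pf "d"),
              ("l", dget p "f" + dget p "d" - 1)]]) ++ goSpec p p rs := ihx
        _ = pr ++ ([("f", dget pf "f" + dget pf "d"), ("d", dget pf "d"),
              ("l", dget p "f" + dget p "d" - 1)] :: goSpec p p rs) := by simp
    · rw [if_neg hd, goSpec, if_neg hd, mkNow_insert_l]
      have ihx := ih (done ++ [p]) pf pr hne hp'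
      rw [hlast, hplen] at ihx
      exact ihx

theorem bRuns (pages : List (List (String × Int))) (cur : List (List (String × Int))) :
    ∀ (done : List (List (String × Int)))
      (rs : List ((List (String × Int)) × (List (String × Int)))) (st : Nat)
      (h : done ≠ []), pages = done ++ cur →
    finishB pages ((List.range' done.length cur.length 1).foldl (bStep pages) (rs, st)) =
      rs ++ runsSpec (pages.getD st []) (done.getLast h) cur := by
  induction cur with
  | nil =>
    intro done rsAcc st h hp
    have hl : pages.getD (pages.length - 1) [] = done.getLast h := by
      rw [hp]
      have := getD_append_last done ([] : List (List (String × Int))) [] h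
      simpa using this
    rw [show ([] : List (List (String × Int))).length = 0 from rfl]
    rw [List.range'_zero, List.foldl_nil, finishB, hl, runsSpec]
  | cons p rest ih =>
    intro done rsAcc st h hp
    have hlen : done.length ≠ 0 := by simpa [List.length_eq_zero_iff] using h
    have hget : pages.getD done.length [] = p := by
      rw [hp]; exact getD_append_length done rest p []
    have hgetm : pages.getD (done.length - 1) [] = done.getLast h := by
      rw [hp]; exact getD_append_last done (p :: rest) [] h
    have hne : done ++ [p] ≠ [] := by simp
    have hlast : (done ++ [p]).getLast hne = p := by simp
    have hplen : (done ++ [p]).length = done.length + 1 := by simp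
    have hp' : pages = (done ++ [p]) ++ rest := by simp [hp]
    rw [show (p :: rest).length = rest.length + 1 from rfl, List.range'_succ, List.foldl_cons]
    simp only [bStep, hget, hgetm]
    by_cases hd : dget p "d" ≠ dget (done.getLast h) "d"
    · rw [if_pos hd, runsSpec, if_pos hd]
      have ihx := ih (done ++ [p]) (rsAcc ++ [(pages.getD st [], done.getLast h)])
        done.length hne hp'
      rw [hlast, hplen, hget] at ihx
      rw [ihx]
      simp
    · rw [if_neg hd, runsSpec, if_neg hd]
      have ihx := ih (done ++ [p]) rsAcc st hne hp'
      rw [hlast, hplen] at ihx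
      exact ihx

theorem bMap (runs : List ((List (String × Int)) × (List (String × Int)))) :
    ∀ (suf pre : List ((List (String × Int)) × (List (String × Int)))), runs = pre ++ suf →
    (List.range' pre.length suf.length 1).map (bBuild runs) = outSpec suf := by
  intro suf
  induction suf with
  | nil => intro pre hp; simp [outSpec]
  | cons x t ih =>
    intro pre hp
    have hgetx : runs.getD pre.length ([], []) = x := by
      rw [hp]; exact getD_append_length pre t x ([], [])
    rw [show (x :: t).length = t.length + 1 from rfl, List.range'_succ, List.map_cons]
    have hp' : runs = (pre ++ [x]) ++ t := by simp [hp]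
    have ihx := ih (pre ++ [x]) hp'
    have hpl : (pre ++ [x]).length = pre.length + 1 := by simp
    rw [hpl] at ihx
    match x, t with
    | (pf, pl), [] =>
      have hlt : ¬ (pre.length + 1 < runs.length) := by rw [hp]; simp
      rw [outSpec]
      simp only [bBuild, hgetx, if_neg hlt]
      rw [ihx]
      rfl
    | (pf, pl), q :: t' =>
      have hlt : pre.length + 1 < runs.length := by
        rw [hp]; simp
      have hgetq : runs.getD (pre.length + 1) ([], []) = q := by
        have h2 : runs = (pre ++ [(pf, pl)]) ++ q :: t' := by simp [hp]
        rw [h2]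
        have h3 := getD_append_length (pre ++ [(pf, pl)]) t' q ([], [])
        rwa [List.length_append, List.length_cons, List.length_nil] at h3
      rw [outSpec]
      simp only [bBuild, hgetx, if_pos hlt, hgetq]
      rw [ihx]

theorem runsSpec_head (cur : List (List (String × Int))) (pf pl : List (String × Int)) :
    ∃ pl' t, runsSpec pf pl cur = (pf, pl') :: t := by
  induction cur generalizing pf pl with
  | nil => exact ⟨pl, [], rfl⟩
  | cons p rs ih =>
    rw [runsSpec]
    by_cases hd : dget p "d" ≠ dget pl "d"
    · rw [if_pos hd]; exact ⟨pl, runsSpec p p rs, rfl⟩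
    · rw [if_neg hd]; exact ih pf p

theorem outSpec_runsSpec (cur : List (List (String × Int))) (pf pl : List (String × Int))
    (hd : dget pl "d" = dget pf "d") : outSpec (runsSpec pf pl cur) = goSpec pf pl cur := by
  induction cur generalizing pf pl with
  | nil => simp [runsSpec, outSpec, goSpec, hd]
  | cons p rs ih =>
    rw [runsSpec, goSpec]
    by_cases hne : dget p "d" ≠ dget pl "d"
    · rw [if_pos hne, if_pos hne]
      obtain ⟨pl', t, heq⟩ := runsSpec_head rs p p
      rw [heq, outSpec]
      have ihx := ih p p rfl
      rw [heq] at ihx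
      rw [ihx]
    · rw [if_neg hne, if_neg hne]
      exact ih pf p ((not_not.mp hne).trans hd)

theorem convert_eq_goSpec (p : List (String × Int)) (rest : List (List (String × Int))) :
    convert (p :: rest) = goSpec p p rest := by
  have hbody : convert (p :: rest) =
      finishA ((List.range (p :: rest).length).foldl (aStep (p :: rest))
        ([], PySem.Dict.empty)) := rfl
  rw [hbody]
  have hr : List.range (p :: rest).length = 0 :: List.range' 1 rest.length 1 := by
    rw [List.range_eq_range']
    rw [show (p :: rest).length = rest.length + 1 from rfl]
    rw [List.range'_succ]
  rw [hr, List.foldl_cons]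
  have h0 : aStep (p :: rest) ([], PySem.Dict.empty) 0 = ([], mkNow p p) := rfl
  rw [h0]
  have hne : ([p] : List (List (String × Int))) ≠ [] := by simp
  have := aLoop (p :: rest) rest [p] p [] hne (by simp)
  simpa using this

theorem convert_alt_eq_goSpec (p : List (String × Int)) (rest : List (List (String × Int))) :
    convert_alt (p :: rest) = goSpec p p rest := by
  have hne : ([p] : List (List (String × Int))) ≠ [] := by simp
  have hruns := bRuns (p :: rest) rest [p] [] 0 hne (by simp)
  simp only [List.length_cons, List.length_nil] at hruns
  have hruns' : finishB (p :: rest)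
      ((List.range' 1 rest.length 1).foldl (bStep (p :: rest)) ([], 0)) =
      runsSpec p p rest := by
    simpa [List.getLast] using hruns
  have hbody : convert_alt (p :: rest) =
      (List.range (finishB (p :: rest)
          ((List.range' 1 rest.length 1).foldl (bStep (p :: rest)) ([], 0))).length).map
        (bBuild (finishB (p :: rest)
          ((List.range' 1 rest.length 1).foldl (bStep (p :: rest)) ([], 0)))) := rfl
  rw [hbody, hruns']
  have hmap := bMap (runsSpec p p rest) (runsSpec p p rest) [] rfl
  rw [List.range_eq_range']
  simpa using hmap.trans (outSpec_runsSpec rest p p rfl)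

-- ===== VERDICT (by name: the statement is the Claim_ definition above) =====
theorem convert_spec : Claim_unchanged_convert := by
  intro pages _ _ hD
  match pages with
  | [] => exact absurd rfl hD
  | p :: rest => rw [convert_eq_goSpec, convert_alt_eq_goSpec]

theorem convert_changed : Claim_changed_convert := by
  unfold Claim_changed_convert; decide

theorem convert_tight : Claim_exact_convert := by
  intro pages _ _ hD
  subst hD
  decide
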